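-- pv_equiv track=rewrite | github.com/fgolemo/mcdp | src/mcdp_lang/suggestions.py | iterate_lines
-- ===== SOURCE A (Python) =====
-- from collections import namedtuple
--
-- LineInfo = namedtuple('LineInfo', 'line_string character character_end')
--
-- def iterate_lines(s, offset):
--     # iterate over the lines, yields LineInfo
--     lines = s.split('\n')
--     sofar = 0
--
--     for line_string in lines:
--         l = len(line_string)
--         character = offset + sofar
--         character_end = character + l
-- #
-- #         if line_string != s[character-offset:character_end-offset]:
-- #             print 'error'
-- #             print 'lines', lines
-- #             print 'sofar', sofar
-- #             print 'portion', s[character:character_end]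
-- #             print 'line_string', line_string
--
--         assert line_string == s[character-offset:character_end-offset]
--         yield LineInfo(line_string, character, character_end)
--         sofar += l + 1 # newline
-- ===== SOURCE B (Python) =====
-- from collections import namedtuple
--
-- LineInfo = namedtuple('LineInfo', 'line_string character character_end')
--
-- def iterate_lines(s, offset):
--     # single character scan: yield a line at each '\n', then the unterminated tail
--     start = 0
--     for i, c in enumerate(s):
--         if c == '\n':
--             yield LineInfo(s[start:i], offset + start, offset + i)
--             start = i + 1
--     yield LineInfo(s[start:], offset + start, offset + len(s))
-- ===== Notes on version B (the rewrite author's own statement) =====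
-- stated objective: alternative
-- what changed: Instead of pre-splitting the string into a list of lines and reconstructing offsets with a running 'sofar' counter, B makes a single enumerate scan over the characters, yielding a line at each newline and the unterminated tail at the end.
import Mathlib
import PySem

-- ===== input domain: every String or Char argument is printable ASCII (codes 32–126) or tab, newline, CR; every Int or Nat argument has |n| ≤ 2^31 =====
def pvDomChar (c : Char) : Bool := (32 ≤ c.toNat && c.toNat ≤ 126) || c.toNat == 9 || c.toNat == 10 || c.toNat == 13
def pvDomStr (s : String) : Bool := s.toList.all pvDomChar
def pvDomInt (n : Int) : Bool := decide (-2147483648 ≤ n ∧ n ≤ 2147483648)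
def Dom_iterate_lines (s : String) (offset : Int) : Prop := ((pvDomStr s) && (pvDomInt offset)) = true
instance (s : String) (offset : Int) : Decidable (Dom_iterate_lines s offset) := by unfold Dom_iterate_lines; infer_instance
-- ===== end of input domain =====

-- B replaces split('\n') + a running 'sofar' counter by a single enumerate scan over the characters (alternative decomposition, same cost).
-- Both Pythons are generators; the equivalence is about the materialised sequence of yielded LineInfo triples.

-- ===== PORT A =====
-- split pieces are kept as char lists and turned into String only when yielded;
-- the 'assert line_string == s[...]' always holds (the line IS that slice of s) and contributes no value, so it is not a step here.
def iterate_linesA_go (lines : List (List Char)) (offset : Int) (sofar : Int) : List (String × Int × Int) :=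
  match lines with
  | [] => []
  | line :: rest =>
    let l : Int := line.length
    let character := offset + sofar
    let character_end := character + l
    (String.ofList line, character, character_end) :: iterate_linesA_go rest offset (sofar + l + 1)

def iterate_lines (s : String) (offset : Int) : List (String × Int × Int) :=
  iterate_linesA_go (PySem.Chars.splitOn s.toList ['\n']) offset 0

-- ===== PORT B =====
-- 'for i, c in enumerate(s)' becomes recursion over PySem.List.enumerate; s[start:i] and s[start:] via PySem.List.slice (exact)
def iterate_linesB_go (cs : List Char) (offset : Int) (pairs : List (Int × Char)) (start : Int) : List (String × Int × Int) :=
  match pairs with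
  | [] => [(String.ofList (PySem.List.slice cs (some start) none), offset + start, offset + (cs.length : Int))]
  | (i, c) :: rest =>
    if c = '\n' then
      (String.ofList (PySem.List.slice cs (some start) (some i)), offset + start, offset + i) ::
        iterate_linesB_go cs offset rest (i + 1)
    else iterate_linesB_go cs offset rest start

def iterate_lines_alt (s : String) (offset : Int) : List (String × Int × Int) :=
  iterate_linesB_go s.toList offset (PySem.List.enumerate s.toList 0) 0

-- ===== PRECONDITION & SPEC =====
def Spec_iterate_lines (s : String) (offset : Int) (out : List (String × Int × Int)) : Prop := out = iterate_lines_alt s offset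
instance (s : String) (offset : Int) (out : List (String × Int × Int)) : Decidable (Spec_iterate_lines s offset out) := by unfold Spec_iterate_lines; infer_instance

-- ===== CLAIM (what is proved, stated in full; the proofs are below) =====
def Claim_equal_iterate_lines : Prop := ∀ (s : String) (offset : Int), Dom_iterate_lines s offset → Spec_iterate_lines s offset (iterate_lines s offset)

-- ===== LEMMAS AND PROOFS =====

-- reference splitter: split a char list on '\n'
def ssplit : List Char → List (List Char)
  | [] => [[]]
  | c :: rest =>
    if c = '\n' then [] :: ssplit rest
    else
      match ssplit rest with
      | [] => [[c]]
      | h :: t => (c :: h) :: t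

theorem ssplit_ne_nil (cs : List Char) : ssplit cs ≠ [] := by
  cases cs with
  | nil => simp [ssplit]
  | cons c rest =>
    simp only [ssplit]
    split
    · simp
    · cases h : ssplit rest <;> simp

def consHead (pre : List Char) : List (List Char) → List (List Char)
  | [] => [pre]
  | h :: t => (pre ++ h) :: t

theorem splitOn_go_step (fuel : Nat) (c : Char) (rest acc : List Char) (hacc : List (List Char)) :
    PySem.Chars.splitOn.go ['\n'] (fuel + 1) (c :: rest) acc hacc =
      if c = '\n' then PySem.Chars.splitOn.go ['\n'] fuel rest [] (acc.reverse :: hacc)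
      else PySem.Chars.splitOn.go ['\n'] fuel rest (c :: acc) hacc := by
  rw [PySem.Chars.splitOn.go]
  by_cases h : c = '\n' <;> simp [h, List.isPrefixOf]
  exact fun h' => absurd h'.symm h

theorem splitOn_go_eq (fuel : Nat) : ∀ (l cur : List Char) (hacc : List (List Char)),
    l.length ≤ fuel →
    PySem.Chars.splitOn.go ['\n'] fuel l cur hacc = hacc.reverse ++ consHead cur.reverse (ssplit l) := by
  induction fuel with
  | zero =>
    intro l cur hacc hl
    have : l = [] := List.length_eq_zero_iff.mp (Nat.le_zero.mp hl)
    subst this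
    simp [PySem.Chars.splitOn.go, ssplit, consHead]
  | succ fuel ih =>
    intro l cur hacc hl
    cases l with
    | nil => simp [PySem.Chars.splitOn.go, ssplit, consHead]
    | cons c rest =>
      rw [splitOn_go_step]
      simp only [List.length_cons] at hl
      by_cases h : c = '\n'
      · subst h
        rw [if_pos rfl, ih rest [] _ (by omega)]
        obtain ⟨hh, ht, hr⟩ : ∃ hh ht, ssplit rest = hh :: ht :=
          List.exists_cons_of_ne_nil (ssplit_ne_nil rest)
        simp [ssplit, consHead, hr]
      · rw [if_neg h, ih rest (c :: cur) _ (by omega)]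
        obtain ⟨hh, ht, hr⟩ : ∃ hh ht, ssplit rest = hh :: ht :=
          List.exists_cons_of_ne_nil (ssplit_ne_nil rest)
        simp [ssplit, consHead, hr, h]

theorem splitOn_eq_ssplit (cs : List Char) : PySem.Chars.splitOn cs ['\n'] = ssplit cs := by
  rw [PySem.Chars.splitOn, splitOn_go_eq (cs.length + 1) cs [] [] (by omega)]
  obtain ⟨hh, ht, hr⟩ : ∃ hh ht, ssplit cs = hh :: ht :=
    List.exists_cons_of_ne_nil (ssplit_ne_nil cs)
  simp [consHead, hr]

theorem ssplit_clean (p : List Char) (h : ∀ c ∈ p, c ≠ '\n') : ssplit p = [p] := by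
  induction p with
  | nil => rfl
  | cons c rest ih =>
    have hc : c ≠ '\n' := h c (by simp)
    simp only [ssplit, if_neg hc, ih (fun x hx => h x (by simp [hx]))]

theorem ssplit_clean_prefix (p r : List Char) (h : ∀ c ∈ p, c ≠ '\n') :
    ssplit (p ++ '\n' :: r) = p :: ssplit r := by
  induction p with
  | nil => simp [ssplit]
  | cons c rest ih =>
    have hc : c ≠ '\n' := h c (by simp)
    simp only [List.cons_append, ssplit, if_neg hc, ih (fun x hx => h x (by simp [hx]))]

theorem drop_split (cs : List Char) (st k : Nat) (hst : st ≤ k) (hk : k ≤ cs.length) :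
    cs.drop st = (cs.take k).drop st ++ cs.drop k := by
  conv_lhs => rw [← List.take_append_drop k cs]
  rw [List.drop_append]
  have h0 : st - (cs.take k).length = 0 := by simp [List.length_take]; omega
  rw [h0, List.drop_zero]

theorem scan_eq (t : List Char) : ∀ (cs : List Char) (k st : Nat) (offset : Int),
    cs.drop k = t → st ≤ k → st ≤ cs.length →
    (∀ c ∈ (cs.take k).drop st, c ≠ '\n') →
    iterate_linesB_go cs offset (PySem.List.enumerate t (k : Int)) (st : Int)
      = iterate_linesA_go (ssplit (cs.drop st)) offset (st : Int) := by
  induction t with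
  | nil =>
    intro cs k st offset hdrop hstk hstlen hclean
    have hklen : cs.length ≤ k := by
      by_contra hlt
      have := List.drop_eq_nil_iff.mp hdrop
      omega
    have htake : cs.take k = cs := List.take_of_length_le hklen
    rw [htake] at hclean
    rw [PySem.List.enumerate_nil]
    simp only [iterate_linesB_go]
    rw [ssplit_clean _ hclean]
    simp only [iterate_linesA_go]
    rw [PySem.List.slice_from_natCast]
    refine List.cons_eq_cons.mpr ⟨?_, rfl⟩
    refine Prod.ext rfl (Prod.ext rfl ?_)
    simp only [List.length_drop]
    omega
  | cons c rest ih =>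
    intro cs k st offset hdrop hstk hstlen hclean
    have hklt : k < cs.length := by
      by_contra hge
      rw [List.drop_eq_nil_iff.mpr (by omega)] at hdrop
      simp at hdrop
    have hdrop1 : cs.drop (k + 1) = rest := by
      have : cs.drop (k + 1) = (cs.drop k).drop 1 := by
        rw [List.drop_drop]
      rw [this, hdrop]
      rfl
    have hget : cs[k]? = some c := by
      have h := @List.getElem?_drop _ cs k 0
      rw [hdrop] at h
      simpa using h.symm
    rw [PySem.List.enumerate_cons]
    simp only [iterate_linesB_go]
    by_cases hc : c = '\n'
    · rw [if_pos hc]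
      have hrec := ih cs (k + 1) (k + 1) offset hdrop1 (le_refl _) (by omega)
        (by
          have hnil : (cs.take (k + 1)).drop (k + 1) = [] :=
            List.drop_eq_nil_iff.mpr (by rw [List.length_take]; omega)
          rw [hnil]
          intro x hx
          simp at hx)
      have hcast : ((k : Int) + 1) = ((k + 1 : Nat) : Int) := by push_cast; ring
      rw [hcast, hrec]
      -- right side: ssplit (cs.drop st) = p :: ssplit (cs.drop (k+1)), p the current line
      have hsplitcs : cs.drop st = (cs.take k).drop st ++ '\n' :: cs.drop (k + 1) := by
        rw [drop_split cs st k hstk (by omega), hdrop, hdrop1, hc]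
      rw [hsplitcs, ssplit_clean_prefix _ _ hclean]
      simp only [iterate_linesA_go]
      rw [PySem.List.slice_natCast, List.drop_take]
      have hplen2 : (List.take (k - st) (List.drop st cs)).length = k - st := by
        rw [List.length_take, List.length_drop]; omega
      rw [hplen2, Nat.cast_sub hstk]
      refine List.cons_eq_cons.mpr ⟨?_, ?_⟩
      · refine Prod.ext rfl (Prod.ext rfl ?_)
        push_cast
        omega
      · congr 1
        push_cast
        omega
    · rw [if_neg hc]
      refine ih cs (k + 1) st offset hdrop1 (by omega) hstlen ?_
      intro x hx
      rw [List.take_add_one, hget] at hx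
      simp only [Option.toList_some] at hx
      rw [List.drop_append] at hx
      rcases List.mem_append.mp hx with h1 | h1
      · exact hclean x h1
      · have : st - (cs.take k).length = 0 := by
          simp [List.length_take]; omega
        rw [this, List.drop_zero] at h1
        simp at h1
        rw [h1]; exact hc

-- ===== VERDICT (by name: the statement is the Claim_ definition above) =====
theorem iterate_lines_spec : Claim_equal_iterate_lines := by
  intro s offset _
  show iterate_lines s offset = iterate_lines_alt s offset
  rw [iterate_lines, iterate_lines_alt, splitOn_eq_ssplit]
  have := (scan_eq s.toList s.toList 0 0 offset (by simp) (le_refl _) (by omega) (by simp)).symm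
  simpa using this
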